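-- pv_equiv track=rewrite | github.com/Badhranachu/omr-checking-new | find_columns.py | cluster_1d
-- ===== SOURCE A (Python) =====
-- def cluster_1d(values, gap):
--     if not values: return []
--     vs = sorted(set(values))
--     clusters, curr = [], [vs[0]]
--     for v in vs[1:]:
--         if v - curr[-1] > gap: clusters.append(curr); curr=[v]
--         else: curr.append(v)
--     clusters.append(curr)
--     return clusters
-- ===== SOURCE B (Python) =====
-- def cluster_1d(values, gap):
--     # Staged: (1) sorted unique values, (2) one pass collecting the break
--     # indices where the consecutive difference exceeds gap, (3) partition by
--     # slicing between successive boundaries.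
--     vs = sorted(set(values))
--     if not vs:
--         return []
--     breaks = [i for i in range(1, len(vs)) if vs[i] - vs[i-1] > gap]
--     bounds = [0] + breaks + [len(vs)]
--     return [vs[a:b] for a, b in zip(bounds, bounds[1:])]
-- ===== Notes on version B (the rewrite author's own statement) =====
-- stated objective: alternative
-- what changed: Replaces A's single accumulator-and-branch loop (clusters + growing curr) with a staged pipeline: one pass collects the break indices where consecutive sorted-unique values differ by more than gap, then the list is partitioned by slicing between successive boundary indices.
import Mathlib
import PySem

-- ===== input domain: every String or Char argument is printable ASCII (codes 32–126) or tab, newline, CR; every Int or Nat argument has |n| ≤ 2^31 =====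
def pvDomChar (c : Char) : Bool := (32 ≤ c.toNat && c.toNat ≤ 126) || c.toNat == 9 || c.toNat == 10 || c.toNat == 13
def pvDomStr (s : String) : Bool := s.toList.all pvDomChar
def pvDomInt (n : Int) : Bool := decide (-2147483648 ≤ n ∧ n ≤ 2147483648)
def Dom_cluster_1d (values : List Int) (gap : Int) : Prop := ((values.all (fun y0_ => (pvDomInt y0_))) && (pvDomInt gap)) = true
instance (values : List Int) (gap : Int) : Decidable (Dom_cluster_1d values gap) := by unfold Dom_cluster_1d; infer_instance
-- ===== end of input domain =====

-- B stages the work: one pass collects the break indices where consecutive sorted-unique values differ by more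
-- than gap, then the list is partitioned by slicing between successive boundaries, instead of A's single
-- accumulator-and-branch loop: alternative decomposition, same cost.


-- ===== PORT A =====
-- step of A's for-loop: state = (clusters, curr); curr is always nonempty, curr[-1] = getLastD 0
def clusterStepA (gap : Int) (p : List (List Int) × List Int) (v : Int) : List (List Int) × List Int :=
  if v - p.2.getLastD 0 > gap then (p.1 ++ [p.2], [v]) else (p.1, p.2 ++ [v])

def cluster_1d (values : List Int) (gap : Int) : List (List Int) :=
  if values = [] then []
  else
    let vs := PySem.List.sorted (PySem.Set.ofList values) (fun x => x) false
    match vs with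
    | [] => []   -- unreachable: values ≠ [] so vs ≠ []
    | v0 :: rest =>   -- vs[0], vs[1:]
      let p := rest.foldl (clusterStepA gap) ([], [v0])
      p.1 ++ [p.2]

-- ===== PORT B =====
-- the comprehension '[i for i in range(1, len(vs)) if vs[i] - vs[i-1] > gap]'
def breaksOf (gap : Int) (vs : List Int) : List Int :=
  (PySem.List.pyRange 1 (vs.length : Int) 1).filter
    (fun i => decide (PySem.List.pyGetD vs i 0 - PySem.List.pyGetD vs (i - 1) 0 > gap))

-- the comprehension '[vs[a:b] for a, b in zip(bounds, bounds[1:])]'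
def slicesOf (vs : List Int) (bs : List Int) : List (List Int) :=
  (bs.zip bs.tail).map (fun ab => PySem.List.slice vs (some ab.1) (some ab.2))

def cluster_1d_alt (values : List Int) (gap : Int) : List (List Int) :=
  let vs := PySem.List.sorted (PySem.Set.ofList values) (fun x => x) false
  if vs = [] then []
  else
    let bounds := [0] ++ breaksOf gap vs ++ [(vs.length : Int)]
    slicesOf vs bounds

-- ===== PRECONDITION & SPEC =====
def Spec_cluster_1d (values : List Int) (gap : Int) (out : List (List Int)) : Prop := out = cluster_1d_alt values gap
instance (values : List Int) (gap : Int) (out : List (List Int)) : Decidable (Spec_cluster_1d values gap out) := by unfold Spec_cluster_1d; infer_instance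

-- ===== CLAIM (what is proved, stated in full; the proofs are below) =====
def Claim_equal_cluster_1d : Prop := ∀ (values : List Int) (gap : Int), Dom_cluster_1d values gap → Spec_cluster_1d values gap (cluster_1d values gap)

-- ===== LEMMAS AND PROOFS =====

-- canonical recursive splitter both ports are reduced to (proof helper)
def consStep (gap : Int) (out : List (List Int)) (v : Int) : List (List Int) :=
  match out with
  | (h :: t) :: rest => if h - v ≤ gap then (v :: h :: t) :: rest else [v] :: out
  | _ => [v] :: out

def runB (gap : Int) (xs : List Int) : List (List Int) :=
  xs.foldr (fun v out => consStep gap out v) []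

theorem runB_cons_eq (gap x : Int) (xs : List Int) :
    runB gap (x :: xs) = consStep gap (runB gap xs) x := rfl

-- structural form of A's loop: clusters so far are a fixed prefix
def runA (gap : Int) (curr : List Int) : List Int → List (List Int)
  | [] => [curr]
  | v :: t => if v - curr.getLastD 0 > gap then curr :: runA gap [v] t else runA gap (curr ++ [v]) t

theorem foldA_eq_runA (gap : Int) (xs : List Int) :
    ∀ (cs : List (List Int)) (curr : List Int),
      (xs.foldl (clusterStepA gap) (cs, curr)).1 ++ [(xs.foldl (clusterStepA gap) (cs, curr)).2]
        = cs ++ runA gap curr xs := by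
  induction xs with
  | nil => intro cs curr; simp [runA]
  | cons v t ih =>
      intro cs curr
      show ((t.foldl (clusterStepA gap) (clusterStepA gap (cs, curr) v)).1
              ++ [(t.foldl (clusterStepA gap) (clusterStepA gap (cs, curr) v)).2])
            = cs ++ runA gap curr (v :: t)
      have hstep : clusterStepA gap (cs, curr) v
          = if v - curr.getLastD 0 > gap then (cs ++ [curr], [v]) else (cs, curr ++ [v]) := rfl
      have hrun : runA gap curr (v :: t)
          = if v - curr.getLastD 0 > gap then curr :: runA gap [v] t else runA gap (curr ++ [v]) t := rfl
      rw [hstep, hrun]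
      by_cases h : v - curr.getLastD 0 > gap
      · rw [if_pos h, if_pos h, ih]; simp
      · rw [if_neg h, if_neg h, ih]

theorem runB_cons (gap : Int) (x : Int) (xs : List Int) :
    ∃ cl rest, runB gap (x :: xs) = (x :: cl) :: rest := by
  induction xs generalizing x with
  | nil => exact ⟨[], [], rfl⟩
  | cons y t ih =>
      obtain ⟨cl, rest, h⟩ := ih y
      by_cases hg : y - x ≤ gap
      · refine ⟨y :: cl, rest, ?_⟩
        rw [runB_cons_eq, h]
        show (if y - x ≤ gap then (x :: y :: cl) :: rest else [x] :: (y :: cl) :: rest)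
              = (x :: y :: cl) :: rest
        rw [if_pos hg]
      · refine ⟨[], (y :: cl) :: rest, ?_⟩
        rw [runB_cons_eq, h]
        show (if y - x ≤ gap then (x :: y :: cl) :: rest else [x] :: (y :: cl) :: rest)
              = [x] :: (y :: cl) :: rest
        rw [if_neg hg]

theorem runA_eq_runB (gap : Int) (xs : List Int) :
    ∀ (c : Int) (cs : List Int) (cl : List Int) (rest : List (List Int)),
      runB gap (c :: xs) = (c :: cl) :: rest →
      runA gap (cs ++ [c]) xs = (cs ++ c :: cl) :: rest := by
  induction xs with
  | nil =>
      intro c cs cl rest h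
      have h' : ([[c]] : List (List Int)) = (c :: cl) :: rest := h
      obtain ⟨h1, hrest⟩ := List.cons_eq_cons.mp h'
      obtain ⟨_, hcl⟩ := List.cons_eq_cons.mp h1
      replace hcl : cl = [] := hcl.symm
      replace hrest : rest = [] := hrest.symm
      subst hcl; subst hrest
      simp [runA]
  | cons v t ih =>
      intro c cs cl rest h
      obtain ⟨cl2, rest2, h2⟩ := runB_cons gap v t
      rw [runB_cons_eq, h2] at h
      have hstep : consStep gap ((v :: cl2) :: rest2) c
          = if v - c ≤ gap then (c :: v :: cl2) :: rest2 else [c] :: (v :: cl2) :: rest2 := rfl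
      rw [hstep] at h
      have hlast : (cs ++ [c]).getLastD 0 = c := by simp
      unfold runA
      by_cases hg : v - c ≤ gap
      · rw [if_pos hg] at h
        obtain ⟨h1, hrest⟩ := List.cons_eq_cons.mp h
        obtain ⟨_, hcl⟩ := List.cons_eq_cons.mp h1
        replace hcl : cl = v :: cl2 := hcl.symm
        replace hrest : rest = rest2 := hrest.symm
        have hnot : ¬ v - (cs ++ [c]).getLastD 0 > gap := by rw [hlast]; omega
        rw [if_neg hnot, ih v (cs ++ [c]) cl2 rest2 h2, hcl, hrest]
        simp
      · rw [if_neg hg] at h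
        obtain ⟨h1, hrest⟩ := List.cons_eq_cons.mp h
        obtain ⟨_, hcl⟩ := List.cons_eq_cons.mp h1
        replace hcl : cl = [] := hcl.symm
        replace hrest : rest = (v :: cl2) :: rest2 := hrest.symm
        have hyes : v - (cs ++ [c]).getLastD 0 > gap := by rw [hlast]; omega
        rw [if_pos hyes]
        have h3 := ih v [] cl2 rest2 h2
        simp at h3
        rw [h3, hcl, hrest]

-- B-side lemmas
theorem pyGetD_cons_shift (v : Int) (u : List Int) (i : Int) (hi : 0 ≤ i) :
    PySem.List.pyGetD (v :: u) (i + 1) 0 = PySem.List.pyGetD u i 0 := by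
  obtain ⟨k, rfl⟩ := Int.eq_ofNat_of_zero_le hi
  have h1 : ((k : Int) + 1) = ((k + 1 : Nat) : Int) := by push_cast; ring
  rw [h1, PySem.List.pyGetD_natCast, PySem.List.pyGetD_natCast]
  simp [List.getD]

theorem slice_cons_succ (v : Int) (t : List Int) (a b : Int) (ha : 0 ≤ a) (hb : 0 ≤ b) :
    PySem.List.slice (v :: t) (some (a + 1)) (some (b + 1)) = PySem.List.slice t (some a) (some b) := by
  rw [PySem.List.slice_toNat _ (by omega) (by omega), PySem.List.slice_toNat _ ha hb]
  have h1 : (a + 1).toNat = a.toNat + 1 := by omega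
  have h2 : (b + 1).toNat = b.toNat + 1 := by omega
  simp [h1, h2]

theorem slice_zero_succ (v : Int) (t : List Int) (b : Int) (hb : 0 ≤ b) :
    PySem.List.slice (v :: t) (some 0) (some (b + 1)) = v :: PySem.List.slice t (some 0) (some b) := by
  rw [PySem.List.slice_toNat _ (by omega) (by omega), PySem.List.slice_toNat _ le_rfl hb]
  have h2 : (b + 1).toNat = b.toNat + 1 := by omega
  simp [h2]

theorem slicesOf_cons (vs : List Int) (a b : Int) (L : List Int) :
    slicesOf vs (a :: b :: L) = PySem.List.slice vs (some a) (some b) :: slicesOf vs (b :: L) := rfl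

theorem slicesOf_shift (v : Int) (t : List Int) (bs : List Int) (h : ∀ b ∈ bs, 0 ≤ b) :
    slicesOf (v :: t) (bs.map (· + 1)) = slicesOf t bs := by
  unfold slicesOf
  rw [show (bs.map (· + 1)).tail = bs.tail.map (· + 1) by
        cases bs <;> simp,
      List.zip_map, List.map_map]
  apply List.map_congr_left
  intro ab hab
  obtain ⟨a, b⟩ := ab
  obtain ⟨h1, h2⟩ := List.of_mem_zip hab
  exact slice_cons_succ v t a b (h _ h1) (h _ (List.mem_of_mem_tail h2))

theorem breaks_ge_one (gap : Int) (vs : List Int) : ∀ i ∈ breaksOf gap vs, 1 ≤ i := by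
  intro i hi
  have := (List.mem_filter.mp hi).1
  exact (PySem.List.mem_pyRange_one.mp this).1

theorem breaks_cons (gap v w : Int) (t : List Int) :
    breaksOf gap (v :: w :: t)
      = (if w - v > gap then [1] else []) ++ (breaksOf gap (w :: t)).map (· + 1) := by
  unfold breaksOf
  have hlen : (((v :: w :: t).length : Nat) : Int) = (((w :: t).length : Nat) : Int) + 1 := by
    simp
  rw [hlen]
  have hpos : (0 : Int) < (((w :: t).length : Nat) : Int) := by
    exact_mod_cast Nat.succ_pos t.length
  have hcons : PySem.List.pyRange 1 ((((w :: t).length : Nat) : Int) + 1) 1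
      = 1 :: PySem.List.pyRange 2 ((((w :: t).length : Nat) : Int) + 1) 1 :=
    PySem.List.pyRange_one_cons (by omega)
  have hshift : PySem.List.pyRange 2 ((((w :: t).length : Nat) : Int) + 1) 1
      = (PySem.List.pyRange 1 (((w :: t).length : Nat) : Int) 1).map (· + 1) := by
    rw [PySem.List.pyRange_one, PySem.List.pyRange_one, List.map_map]
    have h2 : ((((w :: t).length : Nat) : Int) + 1 - 2).toNat = ((((w :: t).length : Nat) : Int) - 1).toNat := by omega
    rw [h2]
    apply List.map_congr_left
    intro k _
    simp
    ring
  rw [hcons, hshift, List.filter_cons, List.filter_map]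
  have hP1 : PySem.List.pyGetD (v :: w :: t) 1 0 = w := by
    have := pyGetD_cons_shift v (w :: t) 0 le_rfl
    simpa [PySem.List.pyGetD_zero_cons] using this
  have hfc : List.filter
        ((fun i => decide (PySem.List.pyGetD (v :: w :: t) i 0 - PySem.List.pyGetD (v :: w :: t) (i - 1) 0 > gap)) ∘ (· + 1))
        (PySem.List.pyRange 1 (((w :: t).length : Nat) : Int) 1)
      = List.filter
        (fun i => decide (PySem.List.pyGetD (w :: t) i 0 - PySem.List.pyGetD (w :: t) (i - 1) 0 > gap))
        (PySem.List.pyRange 1 (((w :: t).length : Nat) : Int) 1) := by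
    apply List.filter_congr
    intro i hi
    have h1i : 1 ≤ i := (PySem.List.mem_pyRange_one.mp hi).1
    have e1 : PySem.List.pyGetD (v :: w :: t) (i + 1) 0 = PySem.List.pyGetD (w :: t) i 0 :=
      pyGetD_cons_shift v (w :: t) i (by omega)
    have e2 : PySem.List.pyGetD (v :: w :: t) (i + 1 - 1) 0 = PySem.List.pyGetD (w :: t) (i - 1) 0 := by
      have := pyGetD_cons_shift v (w :: t) (i - 1) (by omega)
      have hi' : i - 1 + 1 = i := by omega
      rw [hi'] at this
      simpa using this
    simp only [Function.comp_apply, e1, e2]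
  rw [hfc]
  by_cases hg : w - v > gap
  · rw [if_pos hg]
    have : (decide (PySem.List.pyGetD (v :: w :: t) 1 0 - PySem.List.pyGetD (v :: w :: t) (1 - 1) 0 > gap)) = true := by
      simp [hP1, PySem.List.pyGetD_zero_cons]
      omega
    rw [this]
    simp
  · rw [if_neg hg]
    have : (decide (PySem.List.pyGetD (v :: w :: t) 1 0 - PySem.List.pyGetD (v :: w :: t) (1 - 1) 0 > gap)) = false := by
      simp [hP1, PySem.List.pyGetD_zero_cons]
      omega
    rw [this]
    simp

theorem slices_eq_runB (gap : Int) (t : List Int) :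
    ∀ v : Int, slicesOf (v :: t) (0 :: breaksOf gap (v :: t) ++ [((v :: t).length : Int)])
      = runB gap (v :: t) := by
  induction t with
  | nil =>
      intro v
      have hb : breaksOf gap [v] = [] := by
        unfold breaksOf
        rw [show (([v] : List Int).length : Int) = 1 by simp, PySem.List.pyRange_one_eq_nil le_rfl]
        rfl
      rw [hb]
      show PySem.List.slice [v] (some 0) (some 1) :: slicesOf [v] [1] = runB gap [v]
      rw [PySem.List.slice_toNat _ le_rfl (by omega)]
      rfl
  | cons w t' ih =>
      intro v
      have hM : ∀ m ∈ (0 : Int) :: breaksOf gap (w :: t') ++ [(((w :: t').length : Nat) : Int)], 0 ≤ m := by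
        intro m hm
        rcases List.mem_cons.mp hm with h0 | hm'
        · omega
        rcases List.mem_append.mp hm' with hb | hl
        · have := breaks_ge_one gap (w :: t') m hb; omega
        · have : m = (((w :: t').length : Nat) : Int) := by simpa using hl
          subst this; positivity
      have hIH : slicesOf (w :: t') ((0 : Int) :: breaksOf gap (w :: t') ++ [(((w :: t').length : Nat) : Int)])
          = runB gap (w :: t') := ih w
      obtain ⟨cl, rest, hr⟩ := runB_cons gap w t'
      have hrunB : runB gap (v :: w :: t') = consStep gap ((w :: cl) :: rest) v := by
        rw [runB_cons_eq, hr]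
      have hlist : (0 : Int) :: breaksOf gap (v :: w :: t') ++ [(((v :: w :: t').length : Nat) : Int)]
          = 0 :: ((if w - v > gap then [1] else []) ++ (breaksOf gap (w :: t')).map (· + 1)
              ++ [(((w :: t').length : Nat) : Int) + 1]) := by
        rw [breaks_cons gap v w t']
        simp
      by_cases hg : w - v > gap
      · rw [hlist, if_pos hg]
        have h01 : ([1] : List Int) ++ (breaksOf gap (w :: t')).map (· + 1) ++ [(((w :: t').length : Nat) : Int) + 1]
            = ((0 : Int) :: breaksOf gap (w :: t') ++ [(((w :: t').length : Nat) : Int)]).map (· + 1) := by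
          simp
        rw [h01]
        have hmap : ((0 : Int) :: breaksOf gap (w :: t') ++ [(((w :: t').length : Nat) : Int)]).map (· + 1)
            = 1 :: ((breaksOf gap (w :: t') ++ [(((w :: t').length : Nat) : Int)]).map (· + 1)) := by simp
        rw [hmap, slicesOf_cons, ← hmap, slicesOf_shift v (w :: t') _ hM, hIH, hr, hrunB]
        have hs1 : PySem.List.slice (v :: w :: t') (some 0) (some 1) = [v] := by
          rw [PySem.List.slice_toNat _ le_rfl (by omega)]
          rfl
        rw [hs1]
        change ([v] : List Int) :: (w :: cl) :: rest
            = if w - v ≤ gap then (v :: w :: cl) :: rest else [v] :: (w :: cl) :: rest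
        rw [if_neg (by omega)]
      · rw [hlist, if_neg hg]
        obtain ⟨m0, M', hM0⟩ :
            ∃ m0 M', breaksOf gap (w :: t') ++ [(((w :: t').length : Nat) : Int)] = m0 :: M' :=
          List.exists_cons_of_ne_nil (by simp)
        rw [List.cons_append, hM0] at hIH
        have hMv : ∀ m ∈ (m0 : Int) :: M', 0 ≤ m := by
          intro m hm
          exact hM m (by rw [List.cons_append, hM0]; exact List.mem_cons_of_mem _ hm)
        have hm0 : (0 : Int) ≤ m0 := hMv m0 (by simp)
        have h02 : ([] : List Int) ++ (breaksOf gap (w :: t')).map (· + 1) ++ [(((w :: t').length : Nat) : Int) + 1]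
            = ((m0 : Int) :: M').map (· + 1) := by
          rw [← hM0]
          simp
        rw [h02]
        have hmapc : ((m0 : Int) :: M').map (· + 1) = (m0 + 1) :: M'.map (· + 1) := rfl
        rw [hmapc, slicesOf_cons, ← hmapc, slicesOf_shift v (w :: t') _ hMv]
        have hpair : PySem.List.slice (w :: t') (some 0) (some m0) :: slicesOf (w :: t') (m0 :: M')
            = (w :: cl) :: rest := by
          rw [← slicesOf_cons, hIH, hr]
        have hhead : PySem.List.slice (w :: t') (some 0) (some m0) = w :: cl := (List.cons_eq_cons.mp hpair).1
        have htail : slicesOf (w :: t') (m0 :: M') = rest := (List.cons_eq_cons.mp hpair).2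
        rw [slice_zero_succ v (w :: t') m0 hm0, hhead, htail, hrunB]
        change ((v :: w :: cl) : List Int) :: rest
            = if w - v ≤ gap then (v :: w :: cl) :: rest else [v] :: (w :: cl) :: rest
        rw [if_pos (by omega)]

-- ===== VERDICT (by name: the statement is the Claim_ definition above) =====
theorem cluster_1d_spec : Claim_equal_cluster_1d := by
  intro values gap _
  unfold Spec_cluster_1d
  by_cases hv : values = []
  · subst hv
    have hs : PySem.List.sorted ([] : List Int) (fun x => x) false = [] := by
      rw [PySem.List.sorted_eq_nil_iff]
    simp [cluster_1d, cluster_1d_alt, hs]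
  · have hvs : PySem.List.sorted (PySem.Set.ofList values) (fun x => x) false ≠ [] := by
      rw [Ne, PySem.List.sorted_eq_nil_iff]
      intro h
      obtain ⟨x, hx⟩ := List.exists_mem_of_ne_nil values hv
      have hmem : x ∈ PySem.Set.ofList values := by
        simpa [PySem.Set.mem_ofList] using hx
      simp [h] at hmem
    obtain ⟨v0, rest, hsplit⟩ := List.exists_cons_of_ne_nil hvs
    obtain ⟨cl, rest', hB⟩ := runB_cons gap v0 rest
    have hA : cluster_1d values gap = runA gap [v0] rest := by
      simp only [cluster_1d, if_neg hv, hsplit]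
      simpa using foldA_eq_runA gap rest [] [v0]
    have hAlt : cluster_1d_alt values gap = runB gap (v0 :: rest) := by
      simp only [cluster_1d_alt, hsplit, if_neg (by simp : (v0 :: rest) ≠ [])]
      exact slices_eq_runB gap rest v0
    rw [hA, hAlt, hB]
    simpa using runA_eq_runB gap rest v0 [] cl rest' hB
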